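-- pv_equiv track=rewrite | github.com/TS6205Ashok/Auto-Coding-Agent | app/services/file_service.py | build_file_tree_from_paths
-- ===== SOURCE A (Python) =====
-- from typing import Any, Mapping, Sequence
--
-- def build_file_tree_from_paths(paths: list[str]) -> str:
--     if not paths:
--         return ""
--
--     tree: dict[str, Any] = {}
--     for raw_path in paths:
--         parts = [part for part in raw_path.replace("\\", "/").split("/") if part]
--         current = tree
--         for part in parts:
--             current = current.setdefault(part, {})
--
--     lines: list[str] = []
--
--     def walk(node: dict[str, Any], depth: int = 0) -> None:
--         for name, child in sorted(node.items()):
--             lines.append(f"{'  ' * depth}{name}")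
--             walk(child, depth + 1)
--
--     walk(tree)
--     return "\n".join(lines)
-- ===== SOURCE B (Python) =====
-- def build_file_tree_from_paths(paths: list[str]) -> str:
--     if not paths:
--         return ""
--
--     prefixes: set = set()
--     for raw_path in paths:
--         parts = [part for part in raw_path.replace("\\", "/").split("/") if part]
--         for i in range(len(parts)):
--             prefixes.add(tuple(parts[: i + 1]))
--
--     return "\n".join(
--         f"{'  ' * (len(t) - 1)}{t[-1]}" for t in sorted(prefixes)
--     )
-- ===== Notes on version B (the rewrite author's own statement) =====
-- stated objective: alternative
-- what changed: A builds a nested-dict trie and walks it with a recursive sorted DFS; B builds no tree at all: it collects every nonempty prefix of each path's component list into one flat set, sorts that set lexicographically once, and renders each prefix as a line indented by its length.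
import Mathlib
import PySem

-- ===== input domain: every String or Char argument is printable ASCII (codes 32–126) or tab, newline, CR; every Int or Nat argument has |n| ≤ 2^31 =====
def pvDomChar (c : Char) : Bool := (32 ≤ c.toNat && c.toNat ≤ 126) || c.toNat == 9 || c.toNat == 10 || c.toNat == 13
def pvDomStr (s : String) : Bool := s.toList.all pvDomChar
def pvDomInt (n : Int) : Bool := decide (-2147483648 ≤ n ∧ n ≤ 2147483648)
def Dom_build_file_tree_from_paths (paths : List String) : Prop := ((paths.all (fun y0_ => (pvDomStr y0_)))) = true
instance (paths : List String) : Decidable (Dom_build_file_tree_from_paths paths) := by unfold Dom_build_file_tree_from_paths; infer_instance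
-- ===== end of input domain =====

-- B replaces A's recursive trie (nested dicts + sorted DFS) by one flat set of component
-- prefixes sorted lexicographically — a different data structure, same exact output (objective: alternative).

-- ===== PORT A =====

-- shared helper: '  ' * d (a string of 2*d spaces)
def pvIndent (d : Nat) : String := String.ofList (List.replicate (2 * d) ' ')

-- shared helper: [part for part in raw_path.replace("\\", "/").split("/") if part]
-- (split? "/" is always `some` since the separator is nonempty)
def pvNorm (s : String) : List String :=
  ((PySem.Str.split? (PySem.Str.replace s "\\" "/") "/").getD []).filter (fun p => p ≠ "")

-- the nested dict[str, Any] trie of A ('mutual' because a nested inductive is not allowed)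
mutual
inductive PvTrie where
  | mk : PvTrieL → PvTrie
inductive PvTrieL where
  | nil : PvTrieL
  | cons : String → PvTrie → PvTrieL → PvTrieL
end

-- node.items() as an association list
def PvTrieL.items : PvTrieL → List (String × PvTrie)
  | .nil => []
  | .cons k c r => (k, c) :: r.items

-- the inner 'for part in parts: current = current.setdefault(part, {})' chain:
-- descend into the child at the first component (appending a fresh child if absent,
-- exactly dict.setdefault's insertion-order behaviour), recurse with the rest
mutual
def PvTrie.insertPath : PvTrie → List String → PvTrie
  | t, [] => t
  | .mk l, p :: ps => .mk (l.update p ps)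
termination_by _ ps => (ps.length, 0)
def PvTrieL.update : PvTrieL → String → List String → PvTrieL
  | .nil, p, ps => .cons p (PvTrie.insertPath (.mk .nil) ps) .nil
  | .cons k c r, p, ps =>
    if k = p then .cons k (PvTrie.insertPath c ps) r
    else .cons k c (r.update p ps)
termination_by l _ ps => (ps.length, 1 + sizeOf l)
end

-- termination of walk: a child is smaller than its node
theorem pv_items_sizeOf : ∀ (l : PvTrieL) (k : String) (c : PvTrie),
    (k, c) ∈ l.items → sizeOf c < sizeOf (PvTrie.mk l)
  | .nil, _, _, h => by simp [PvTrieL.items] at h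
  | .cons k' c' r, k, c, h => by
    simp [PvTrieL.items] at h
    rcases h with ⟨_, rfl⟩ | h
    · simp; omega
    · have := pv_items_sizeOf r k c h
      simp at this ⊢; omega

-- A's walk: sorted(node.items()) sorts the pairs; the node's keys are distinct, so
-- sorting by the key alone is exact (the dict in second position is never compared)
def PvTrie.walk : PvTrie → Nat → List String
  | .mk l, depth =>
    (PySem.List.sorted l.items (fun kv => kv.1) false).attach.foldl
      (fun lines kv =>
        lines ++ [pvIndent depth ++ kv.1.1] ++ PvTrie.walk kv.1.2 (depth + 1)) []
termination_by t _ => sizeOf t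
decreasing_by
  exact pv_items_sizeOf _ kv.1.1 kv.1.2
    (by have := kv.2; rwa [PySem.List.mem_sorted] at this)

def build_file_tree_from_paths (paths : List String) : String :=
  if paths = [] then ""
  else
    PySem.Str.join "\n"
      ((paths.foldl (fun t rp => t.insertPath (pvNorm rp)) (PvTrie.mk .nil)).walk 0)

-- ===== PORT B =====

-- all nonempty prefixes parts[: i + 1], i in range(len(parts))
def pvPrefixes (cs : List String) : List (List String) :=
  (List.range cs.length).map (fun i => cs.take (i + 1))

-- B: one flat set of prefix tuples, sorted lexicographically, one line per tuple
-- (t[-1] is ported as pyGet? t (-1); every collected prefix is nonempty, so the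
-- default "" of getD is never used)
def build_file_tree_from_paths_alt (paths : List String) : String :=
  if paths = [] then ""
  else
    PySem.Str.join "\n"
      ((PySem.List.sorted
          (paths.foldl (fun s rp => (pvPrefixes (pvNorm rp)).foldl PySem.Set.add s)
            (PySem.Set.empty : PySem.Set (List String)))
          (fun t => t) false).map
        (fun t => pvIndent (t.length - 1) ++ ((PySem.List.pyGet? t (-1)).getD "")))

-- ===== PRECONDITION & SPEC =====
def Spec_build_file_tree_from_paths (paths : List String) (out : String) : Prop := out = build_file_tree_from_paths_alt paths
instance (paths : List String) (out : String) : Decidable (Spec_build_file_tree_from_paths paths out) := by unfold Spec_build_file_tree_from_paths; infer_instance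

-- ===== CLAIM (what is proved, stated in full; the proofs are below) =====
def Claim_equal_build_file_tree_from_paths : Prop := ∀ (paths : List String), Dom_build_file_tree_from_paths paths → Spec_build_file_tree_from_paths paths (build_file_tree_from_paths paths)

-- ===== LEMMAS AND PROOFS =====

-- the key-paths stored in a trie, in trie order
mutual
def PvTrie.keyPaths : PvTrie → List (List String)
  | .mk l => l.keyPathsL
def PvTrieL.keyPathsL : PvTrieL → List (List String)
  | .nil => []
  | .cons k c r => ([k] :: (PvTrie.keyPaths c).map (k :: ·)) ++ r.keyPathsL
end

def PvTrieL.keys : PvTrieL → List String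
  | .nil => []
  | .cons k _ r => k :: r.keys

-- well-formedness: distinct keys at every node (true for every trie A builds)
mutual
def PvTrie.Wf : PvTrie → Prop
  | .mk l => l.keys.Nodup ∧ l.WfL
def PvTrieL.WfL : PvTrieL → Prop
  | .nil => True
  | .cons _ c r => c.Wf ∧ r.WfL
end

theorem pv_keys_eq : ∀ l : PvTrieL, l.keys = l.items.map Prod.fst
  | .nil => rfl
  | .cons k c r => by simp [PvTrieL.keys, PvTrieL.items, pv_keys_eq r]

theorem pv_keyPathsL_eq_flatMap : ∀ l : PvTrieL,
    l.keyPathsL = l.items.flatMap (fun kv => [kv.1] :: (kv.2.keyPaths).map (kv.1 :: ·))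
  | .nil => rfl
  | .cons k c r => by simp [PvTrieL.keyPathsL, PvTrieL.items, pv_keyPathsL_eq_flatMap r]

theorem pv_keyPathsL_shape : ∀ (l : PvTrieL) (q : List String), q ∈ l.keyPathsL →
    ∃ k p, k ∈ l.keys ∧ q = k :: p
  | .cons k c r, q, h => by
    simp [PvTrieL.keyPathsL] at h
    rcases h with rfl | ⟨p, _, rfl⟩ | h
    · exact ⟨k, [], by simp [PvTrieL.keys]⟩
    · exact ⟨k, p, by simp [PvTrieL.keys]⟩
    · obtain ⟨k', p', hk', rfl⟩ := pv_keyPathsL_shape r q h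
      exact ⟨k', p', by simp [PvTrieL.keys, hk']⟩

theorem pv_ne_nil_of_mem_keyPaths (t : PvTrie) (q : List String) (h : q ∈ t.keyPaths) : q ≠ [] := by
  obtain ⟨l⟩ := t
  obtain ⟨k, p, _, rfl⟩ := pv_keyPathsL_shape l q h
  simp

theorem pvPrefixes_cons (c : String) (cs : List String) :
    pvPrefixes (c :: cs) = [c] :: (pvPrefixes cs).map (c :: ·) := by
  simp [pvPrefixes, List.range_succ_eq_map, List.map_map, Function.comp, List.take_succ_cons]

-- membership in keyPaths after one insertion = old membership or a prefix of the inserted path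
mutual
theorem pv_mem_insertPath : ∀ (cs : List String) (t : PvTrie) (q : List String),
    q ∈ (t.insertPath cs).keyPaths ↔ q ∈ t.keyPaths ∨ q ∈ pvPrefixes cs
  | [], t, q => by simp [PvTrie.insertPath, pvPrefixes]
  | c :: cs, .mk l, q => by
    rw [show PvTrie.insertPath (.mk l) (c :: cs) = .mk (l.update c cs) by
      simp [PvTrie.insertPath]]
    rw [show (PvTrie.mk (l.update c cs)).keyPaths = (l.update c cs).keyPathsL from rfl,
      show (PvTrie.mk l).keyPaths = l.keyPathsL from rfl]
    rw [pv_mem_update cs c l q, pvPrefixes_cons]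
    simp
    tauto
termination_by cs _ _ => (cs.length, 0)
theorem pv_mem_update : ∀ (cs : List String) (c : String) (l : PvTrieL) (q : List String),
    q ∈ (l.update c cs).keyPathsL ↔
      q ∈ l.keyPathsL ∨ q = [c] ∨ ∃ p ∈ pvPrefixes cs, q = c :: p
  | cs, c, .nil, q => by
    simp [PvTrieL.update, PvTrieL.keyPathsL]
    constructor
    · rintro (rfl | ⟨p, hp, rfl⟩)
      · exact Or.inl rfl
      · rw [pv_mem_insertPath cs (.mk .nil) p] at hp
        simp [PvTrie.keyPaths, PvTrieL.keyPathsL] at hp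
        exact Or.inr ⟨p, hp, rfl⟩
    · rintro (rfl | ⟨p, hp, rfl⟩)
      · exact Or.inl rfl
      · refine Or.inr ⟨p, ?_, rfl⟩
        rw [pv_mem_insertPath cs (.mk .nil) p]
        exact Or.inr hp
  | cs, c, .cons k ch r, q => by
    by_cases hk : k = c
    · subst hk
      rw [show (PvTrieL.cons k ch r).update k cs = .cons k (ch.insertPath cs) r by
        simp [PvTrieL.update]]
      simp [PvTrieL.keyPathsL]
      constructor
      · rintro (rfl | ⟨p, hp, rfl⟩ | h)
        · tauto
        · rw [pv_mem_insertPath cs ch p] at hp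
          rcases hp with hp | hp
          · exact Or.inl (Or.inr (Or.inl ⟨p, hp, rfl⟩))
          · exact Or.inr (Or.inr ⟨p, hp, rfl⟩)
        · tauto
      · rintro ((rfl | ⟨p, hp, rfl⟩ | h) | rfl | ⟨p, hp, rfl⟩)
        · tauto
        · exact Or.inr (Or.inl ⟨p, by rw [pv_mem_insertPath cs ch p]; exact Or.inl hp, rfl⟩)
        · tauto
        · tauto
        · exact Or.inr (Or.inl ⟨p, by rw [pv_mem_insertPath cs ch p]; exact Or.inr hp, rfl⟩)
    · rw [show (PvTrieL.cons k ch r).update c cs = .cons k ch (r.update c cs) by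
        simp [PvTrieL.update, hk]]
      simp [PvTrieL.keyPathsL]
      rw [pv_mem_update cs c r q]
      simp only [or_assoc]
termination_by cs _ l _ => (cs.length, 1 + sizeOf l)
end

-- Wf is preserved by insertion
theorem pv_keys_update : ∀ (l : PvTrieL) (c : String) (cs : List String),
    (l.update c cs).keys = if c ∈ l.keys then l.keys else l.keys ++ [c]
  | .nil, c, cs => by simp [PvTrieL.update, PvTrieL.keys]
  | .cons k ch r, c, cs => by
    by_cases hk : k = c
    · subst hk; simp [PvTrieL.update, PvTrieL.keys]
    · simp [PvTrieL.update, hk, PvTrieL.keys, pv_keys_update r c cs, Ne.symm hk]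
      split_ifs <;> simp

mutual
theorem pv_wf_insertPath : ∀ (cs : List String) (t : PvTrie), t.Wf → (t.insertPath cs).Wf
  | [], t, h => by simpa [PvTrie.insertPath] using h
  | c :: cs, .mk l, h => by
    rw [show PvTrie.insertPath (.mk l) (c :: cs) = .mk (l.update c cs) by
      simp [PvTrie.insertPath]]
    refine ⟨?_, pv_wfL_update cs c l h.2⟩
    rw [pv_keys_update l c cs]
    split_ifs with hc
    · exact h.1
    · simp [List.nodup_append, h.1]
      intro a ha hac
      exact hc (hac ▸ ha)
termination_by cs _ _ => (cs.length, 0)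
theorem pv_wfL_update : ∀ (cs : List String) (c : String) (l : PvTrieL), l.WfL → (l.update c cs).WfL
  | cs, c, .nil, _ => by
    rw [show PvTrieL.update .nil c cs = .cons c (PvTrie.insertPath (.mk .nil) cs) .nil by
      simp [PvTrieL.update]]
    exact ⟨pv_wf_insertPath cs (.mk .nil) ⟨by simp [PvTrieL.keys], trivial⟩, trivial⟩
  | cs, c, .cons k ch r, h => by
    by_cases hk : k = c
    · subst hk
      rw [show (PvTrieL.cons k ch r).update k cs = .cons k (ch.insertPath cs) r by
        simp [PvTrieL.update]]
      exact ⟨pv_wf_insertPath cs ch h.1, h.2⟩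
    · rw [show (PvTrieL.cons k ch r).update c cs = .cons k ch (r.update c cs) by
        simp [PvTrieL.update, hk]]
      exact ⟨h.1, pv_wfL_update cs c r h.2⟩
termination_by cs _ l => (cs.length, 1 + sizeOf l)
end

-- Wf gives Nodup keyPaths
mutual
theorem pv_nodup_keyPaths : ∀ (t : PvTrie), t.Wf → t.keyPaths.Nodup
  | .mk l, h => pv_nodup_keyPathsL l h.1 h.2
theorem pv_nodup_keyPathsL : ∀ (l : PvTrieL), l.keys.Nodup → l.WfL → l.keyPathsL.Nodup
  | .nil, _, _ => List.nodup_nil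
  | .cons k c r, hk, hw => by
    have hknr : k ∉ r.keys := by simp [PvTrieL.keys, List.nodup_cons] at hk; exact hk.1
    simp only [PvTrieL.keyPathsL, List.cons_append, List.nodup_cons, List.mem_append,
      List.mem_map, List.nodup_append]
    have hshape := pv_keyPathsL_shape r
    refine ⟨?_, ?_, pv_nodup_keyPathsL r (by simp [PvTrieL.keys, List.nodup_cons] at hk; exact hk.2) hw.2, ?_⟩
    · rintro (⟨a, ha, he⟩ | hkr)
      · exact pv_ne_nil_of_mem_keyPaths c a ha (by simpa using he)
      · obtain ⟨k', p', hk', he⟩ := hshape [k] hkr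
        simp at he
        exact hknr (he.1 ▸ hk')
    · exact (List.nodup_map_iff (fun a b hab => by simpa using hab)).mpr
        (pv_nodup_keyPaths c hw.1)
    · rintro a ⟨p, _, rfl⟩ b hb
      obtain ⟨k', p', hk', rfl⟩ := hshape b hb
      intro he
      have : k = k' := by simpa using congrArg (fun l => l.headI) he
      exact hknr (this ▸ hk')
end

-- children of a Wf node are Wf
theorem pv_wf_items : ∀ (l : PvTrieL), l.WfL → ∀ {k : String} {c : PvTrie},
    (k, c) ∈ l.items → c.Wf
  | .cons k' c' r, h, k, c, hm => by
    simp [PvTrieL.items] at hm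
    rcases hm with ⟨_, rfl⟩ | hm
    · exact h.1
    · exact pv_wf_items r h.2 hm

-- sorted does not depend on which (propositionally equal) order instances elaboration picked
theorem pv_sorted_congr {α κ : Type} (i₁ i₂ : LT κ) (h : i₁ = i₂)
    (d₁ : DecidableRel (@LT.lt κ i₁)) (d₂ : DecidableRel (@LT.lt κ i₂))
    (xs : List α) (key : α → κ) (rev : Bool) :
    @PySem.List.sorted α κ i₁ d₁ xs key rev = @PySem.List.sorted α κ i₂ d₂ xs key rev := by
  subst h
  congr 1

-- the two pvLine computations
def pvLine (d : Nat) (q : List String) : String :=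
  pvIndent (d + (q.length - 1)) ++ ((PySem.List.pyGet? q (-1)).getD "")

theorem pvLine_single (d : Nat) (k : String) : pvLine d [k] = pvIndent d ++ k := by
  simp [pvLine, PySem.List.pyGet?, PySem.List.pyIdx?]

theorem pv_pyGet_neg_one_cons (k : String) (p : List String) (hp : p ≠ []) :
    PySem.List.pyGet? (k :: p) (-1) = PySem.List.pyGet? p (-1) := by
  obtain ⟨x, xs, rfl⟩ := List.exists_cons_of_ne_nil hp
  simp [PySem.List.pyGet?, PySem.List.pyIdx?]
  rfl

theorem pvLine_cons (d : Nat) (k : String) (p : List String) (hp : p ≠ []) :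
    pvLine d (k :: p) = pvLine (d + 1) p := by
  have hl : 1 ≤ p.length := List.length_pos_iff.mpr hp
  simp [pvLine, pv_pyGet_neg_one_cons k p hp]
  congr 1
  omega

-- Pairwise (≤) plus Nodup gives Pairwise (<)
theorem pv_pairwise_lt {α : Type} [LinearOrder α] {l : List α}
    (h1 : l.Pairwise (· ≤ ·)) (h2 : l.Nodup) : l.Pairwise (· < ·) :=
  (h1.and h2).imp (fun h => lt_of_le_of_ne h.1 h.2)

-- a Wf node's sorted key-paths are the blocks of its sorted children, concatenated
theorem pv_sorted_keyPaths_node (l : PvTrieL) (hwf : (PvTrie.mk l).Wf) :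
    PySem.List.sorted (PvTrie.mk l).keyPaths (fun x => x) false
      = (PySem.List.sorted l.items (fun kv => kv.1) false).flatMap
          (fun kv => [kv.1] :: (PySem.List.sorted kv.2.keyPaths (fun x => x) false).map (kv.1 :: ·)) := by
  refine (pv_sorted_congr _ _ rfl _ _ (PvTrie.mk l).keyPaths (fun x => x) false).trans
    (PySem.List.sorted_eq_of_perm_of_pairwise_lt _ _ _ ?_ ?_)
  · -- the concatenation is a permutation of the node's key-paths
    have h1 : ((PySem.List.sorted l.items (fun kv => kv.1) false).flatMap
        (fun kv => [kv.1] :: (PySem.List.sorted kv.2.keyPaths (fun x => x) false).map (kv.1 :: ·))).Perm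
        (l.items.flatMap (fun kv => [kv.1] :: (kv.2.keyPaths).map (kv.1 :: ·))) := by
      refine List.Perm.flatMap (PySem.List.sorted_perm l.items _ false) ?_
      intro a _
      exact List.Perm.cons _ (List.Perm.map _ (PySem.List.sorted_perm a.2.keyPaths _ false))
    rw [show (PvTrie.mk l).keyPaths = l.keyPathsL from rfl, pv_keyPathsL_eq_flatMap]
    exact h1
  · -- and it is strictly lexicographically increasing
    rw [List.pairwise_flatMap]
    have hfst : (PySem.List.sorted l.items (fun kv => kv.1) false).Pairwise
        (fun kv kv' => kv.1 < kv'.1) := by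
      have hle := PySem.List.sorted_pairwise l.items (fun kv => kv.1)
      rw [← pv_sorted_congr _ _ rfl _ _ l.items (fun kv => kv.1) false] at hle
      have hnd : ((PySem.List.sorted l.items (fun kv => kv.1) false).map (fun kv => kv.1)).Nodup := by
        rw [List.Perm.nodup_iff (List.Perm.map _ (PySem.List.sorted_perm l.items _ false))]
        rw [← pv_keys_eq]
        exact hwf.1
      have hne : (PySem.List.sorted l.items (fun kv => kv.1) false).Pairwise
          (fun kv kv' => kv.1 ≠ kv'.1) := List.pairwise_map.mp hnd
      exact (hle.and hne).imp (fun h => lt_of_le_of_ne h.1 h.2)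
    constructor
    · -- each block is strictly increasing
      intro a ha
      have hmem : a ∈ l.items := by
        rw [PySem.List.mem_sorted] at ha; exact ha
      have hwfc : a.2.Wf := pv_wf_items l hwf.2 (by simpa using hmem)
      have hltX : (PySem.List.sorted a.2.keyPaths (fun x => x) false).Pairwise (· < ·) := by
        have hle := PySem.List.sorted_pairwise a.2.keyPaths (fun x => x)
        rw [← pv_sorted_congr _ _ rfl _ _ a.2.keyPaths (fun x => x) false] at hle
        exact pv_pairwise_lt hle
          ((List.Perm.nodup_iff (PySem.List.sorted_perm a.2.keyPaths _ false)).mpr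
            (pv_nodup_keyPaths a.2 hwfc))
      refine List.Pairwise.cons ?_ ?_
      · rintro y hy
        obtain ⟨p, hp, rfl⟩ := List.mem_map.mp hy
        rw [PySem.List.mem_sorted] at hp
        have hpne : p ≠ [] := pv_ne_nil_of_mem_keyPaths a.2 p hp
        rw [List.cons_lt_cons_iff]
        refine Or.inr ⟨rfl, ?_⟩
        obtain ⟨x, xs, rfl⟩ := List.exists_cons_of_ne_nil hpne
        exact List.nil_lt_cons x xs
      · exact List.pairwise_map.mpr (hltX.imp (fun h => by
          rw [List.cons_lt_cons_iff]; exact Or.inr ⟨rfl, h⟩))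
    · -- and blocks with smaller keys precede blocks with larger keys
      refine hfst.imp ?_
      intro kv kv' hlt x hx y hy
      have hxs : ∃ tx, x = kv.1 :: tx := by
        rcases List.mem_cons.mp hx with rfl | hx'
        · exact ⟨[], rfl⟩
        · obtain ⟨p, _, rfl⟩ := List.mem_map.mp hx'
          exact ⟨p, rfl⟩
      have hys : ∃ ty, y = kv'.1 :: ty := by
        rcases List.mem_cons.mp hy with rfl | hy'
        · exact ⟨[], rfl⟩
        · obtain ⟨p, _, rfl⟩ := List.mem_map.mp hy'
          exact ⟨p, rfl⟩
      obtain ⟨tx, rfl⟩ := hxs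
      obtain ⟨ty, rfl⟩ := hys
      rw [List.cons_lt_cons_iff]
      exact Or.inl hlt

-- ===== the central lemma: walk = sorted keyPaths, rendered =====
theorem pv_walk_eq : ∀ (t : PvTrie), t.Wf → ∀ (d : Nat),
    t.walk d = (PySem.List.sorted t.keyPaths (fun x => x) false).map (pvLine d)
  | .mk l, hwf, d => by
    rw [show PvTrie.walk (.mk l) d
        = (PySem.List.sorted l.items (fun kv => kv.1) false).attach.foldl
            (fun lines kv => lines ++ [pvIndent d ++ kv.1.1] ++ PvTrie.walk kv.1.2 (d + 1)) []
      by simp [PvTrie.walk]]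
    rw [List.foldl_attach
      (f := fun lines (kv : String × PvTrie) =>
        lines ++ [pvIndent d ++ kv.1] ++ PvTrie.walk kv.2 (d + 1))]
    have hassoc : (fun (lines : List String) (kv : String × PvTrie) =>
        lines ++ [pvIndent d ++ kv.1] ++ PvTrie.walk kv.2 (d + 1))
        = fun lines kv => lines ++ ((pvIndent d ++ kv.1) :: PvTrie.walk kv.2 (d + 1)) := by
      funext lines kv
      simp
    rw [hassoc, PySem.List.foldl_append_eq_flatMap, List.nil_append]
    rw [pv_sorted_keyPaths_node l hwf, List.map_flatMap]
    rw [List.flatMap_def, List.flatMap_def]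
    congr 1
    apply List.map_congr_left
    intro kv hkv
    have hmem : kv ∈ l.items := by rw [PySem.List.mem_sorted] at hkv; exact hkv
    have hwfc : kv.2.Wf := pv_wf_items l hwf.2 (by simpa using hmem)
    have hIH := pv_walk_eq kv.2 hwfc (d + 1)
    rw [hIH, List.map_cons, pvLine_single]
    congr 1
    rw [List.map_map]
    apply List.map_congr_left
    intro p hp
    rw [PySem.List.mem_sorted] at hp
    simpa using (pvLine_cons d kv.1 p (pv_ne_nil_of_mem_keyPaths kv.2 p hp)).symm
termination_by t => sizeOf t
decreasing_by
  exact pv_items_sizeOf l kv.1 kv.2 (by simpa using hmem)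

-- fold lemmas over the whole path list
theorem pv_wf_fold (paths : List String) : ∀ (t : PvTrie), t.Wf →
    (paths.foldl (fun t rp => t.insertPath (pvNorm rp)) t).Wf := by
  induction paths with
  | nil => intro t h; exact h
  | cons rp rest ih => intro t h; exact ih _ (pv_wf_insertPath _ t h)

theorem pv_mem_fold (paths : List String) : ∀ (t : PvTrie) (q : List String),
    q ∈ (paths.foldl (fun t rp => t.insertPath (pvNorm rp)) t).keyPaths ↔
      q ∈ t.keyPaths ∨ ∃ rp ∈ paths, q ∈ pvPrefixes (pvNorm rp) := by
  induction paths with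
  | nil => simp
  | cons rp rest ih =>
    intro t q
    simp only [List.foldl_cons]
    rw [ih _ q, pv_mem_insertPath]
    simp only [List.exists_mem_cons_iff]
    exact or_assoc

theorem pv_update_eq (s : PySem.Set (List String)) (xs : List (List String)) :
    xs.foldl PySem.Set.add s = PySem.Set.update s xs := rfl

theorem pv_mem_prefs (paths : List String) : ∀ (s : PySem.Set (List String)) (q : List String),
    q ∈ paths.foldl (fun s rp => (pvPrefixes (pvNorm rp)).foldl PySem.Set.add s) s ↔
      q ∈ s ∨ ∃ rp ∈ paths, q ∈ pvPrefixes (pvNorm rp) := by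
  induction paths with
  | nil => simp
  | cons rp rest ih =>
    intro s q
    simp only [List.foldl_cons]
    rw [ih, pv_update_eq, PySem.Set.mem_update]
    simp only [List.exists_mem_cons_iff]
    exact or_assoc

theorem pv_nodup_prefs (paths : List String) : ∀ (s : PySem.Set (List String)), s.Nodup →
    (paths.foldl (fun s rp => (pvPrefixes (pvNorm rp)).foldl PySem.Set.add s) s).Nodup := by
  induction paths with
  | nil => intro s h; exact h
  | cons rp rest ih =>
    intro s h
    simp only [List.foldl_cons]
    apply ih
    rw [pv_update_eq]
    exact PySem.Set.nodup_update s _ h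

-- ===== VERDICT (by name: the statement is the Claim_ definition above) =====
theorem build_file_tree_from_paths_spec : Claim_equal_build_file_tree_from_paths := by
  intro paths _
  unfold Spec_build_file_tree_from_paths build_file_tree_from_paths build_file_tree_from_paths_alt
  by_cases hp : paths = []
  · simp [hp]
  · rw [if_neg hp, if_neg hp]
    have hwf : (paths.foldl (fun t rp => t.insertPath (pvNorm rp)) (PvTrie.mk .nil)).Wf :=
      pv_wf_fold paths (PvTrie.mk .nil) ⟨by simp [PvTrieL.keys], trivial⟩
    rw [pv_walk_eq _ hwf 0]
    have hperm : (paths.foldl (fun t rp => t.insertPath (pvNorm rp)) (PvTrie.mk .nil)).keyPaths.Perm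
        (paths.foldl (fun s rp => (pvPrefixes (pvNorm rp)).foldl PySem.Set.add s)
          (PySem.Set.empty : PySem.Set (List String))) := by
      rw [List.perm_ext_iff_of_nodup (pv_nodup_keyPaths _ hwf)
        (pv_nodup_prefs paths PySem.Set.empty List.nodup_nil)]
      intro q
      rw [pv_mem_fold paths _ q, pv_mem_prefs paths _ q]
      simp [PvTrie.keyPaths, PvTrieL.keyPathsL, PySem.Set.empty]
    refine congrArg (PySem.Str.join "\n") ?_
    refine Eq.trans (List.map_congr_left
      (g := fun t => pvIndent (t.length - 1) ++ (PySem.List.pyGet? t (-1)).getD "")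
      (fun q _ => by simp [pvLine])) ?_
    refine congrArg _ ?_
    exact (pv_sorted_congr _ _ rfl _ _ _ _ _).trans
      ((PySem.List.sorted_eq_sorted_of_perm _ _ _ (fun a b h => h) hperm).trans
        ((pv_sorted_congr _ _ rfl _ _ _ _ _).symm))
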